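-- pv_equiv track=rewrite | github.com/LinaC404/silly-guy-try-Leetcode | 1606. Find Servers That Handled Most Number of Requests.py | badbusiestServers
-- ===== SOURCE A (Python) =====
-- def badbusiestServers(k, arrival, load):
--     """
--     :type k: int
--     :type arrival: List[int]
--     :type load: List[int]
--     :rtype: List[int]
--     TLE
--     Based on 10e5, O(N^2) TLE is not surprising
--     105 / 108 test cases passed.
--     """
--     if k>=len(arrival): return [i for i in range(len(arrival))]
--     server_count = {}
--     num_count = {}
--     for i in range(k):
--         server_count[i] = arrival[i]+load[i]
--         num_count[i] = 1
--     server_list = [i for i in range(k)]+[i for i in range(k)]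
--
--     for i in range(k,len(arrival)):
--         tar_server = i%k
--         if server_count[tar_server]>arrival[i]:
--             nextserver = server_list[tar_server+1:tar_server+k]
--             for j in nextserver:
--                 if server_count[j]<=arrival[i]:
--                     server_count[j] = arrival[i]+load[i]
--                     num_count[j] += 1
--                     break
--         else:
--             server_count[tar_server] = arrival[i]+load[i]
--             num_count[tar_server] += 1
--     num_count = sorted(num_count.items(),key=lambda x:x[1])
--     goal = num_count[-1][1]
--     return [j[0] for i,j in enumerate(num_count) if j[1] == goal]
-- ===== SOURCE B (Python) =====
-- def badbusiestServers(k, arrival, load):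
--     n = len(arrival)
--     if k >= n:
--         return list(range(n))
--     end = [arrival[i] + load[i] for i in range(k)]
--     count = [1] * k
--     for i in range(k, n):
--         free = [s for s in range(k) if end[s] <= arrival[i]]
--         if free:
--             s = min(free, key=lambda s: (s - i) % k)
--             end[s] = arrival[i] + load[i]
--             count[s] += 1
--     best = max(count)
--     return [s for s in range(k) if count[s] == best]
-- ===== Notes on version B (the rewrite author's own statement) =====
-- stated objective: alternative
-- what changed: Replaces A's ordered circular scan with early break over a doubled server list (plus dicts and a sort-by-count finish) by building the free-server set each request and selecting the assignee as the argmin of the cyclic distance (s - i) % k, with a max-then-filter finish.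
-- outside the precondition, e.g. on badbusiestServers(1, [0, 5], [10]): A returns [0], B returns [0]
import Mathlib
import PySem

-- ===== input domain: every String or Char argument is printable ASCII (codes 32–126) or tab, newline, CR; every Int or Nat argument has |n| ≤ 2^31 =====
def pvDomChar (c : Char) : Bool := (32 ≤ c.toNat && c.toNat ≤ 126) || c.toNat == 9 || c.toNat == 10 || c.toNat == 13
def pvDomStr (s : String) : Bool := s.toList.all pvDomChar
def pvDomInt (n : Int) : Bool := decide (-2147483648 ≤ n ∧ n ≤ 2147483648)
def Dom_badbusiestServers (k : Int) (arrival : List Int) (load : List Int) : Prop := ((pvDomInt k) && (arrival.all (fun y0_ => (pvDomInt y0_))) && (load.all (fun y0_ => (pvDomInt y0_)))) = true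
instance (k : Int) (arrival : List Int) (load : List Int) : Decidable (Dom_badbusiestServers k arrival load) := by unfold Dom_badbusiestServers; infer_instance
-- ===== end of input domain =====

-- B replaces A's ordered circular scan (doubled server list, slice, early break) by building the
-- free-server set each step and selecting by minimising the cyclic distance (s - i) % k, with a
-- max-then-filter finish instead of A's sort (objective: alternative, same cost).

-- ===== PORT A =====

-- inner 'for j in nextserver: … break' loop of A
def badAInner (arr ld : Int) (nextserver : List Int)
    (sc nc : PySem.Dict Int Int) : PySem.Dict Int Int × PySem.Dict Int Int :=
  match nextserver with
  | [] => (sc, nc)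
  | j :: rest =>
    if sc.getD j 0 ≤ arr then
      (sc.insert j (arr + ld), nc.insert j (nc.getD j 0 + 1))
    else badAInner arr ld rest sc nc

-- one iteration of A's main 'for i in range(k, len(arrival))' loop
def badAStep (k : Int) (arrival load serverList : List Int)
    (p : PySem.Dict Int Int × PySem.Dict Int Int) (i : Int) :
    PySem.Dict Int Int × PySem.Dict Int Int :=
  if PySem.List.pyGetD arrival i 0 < p.1.getD (PySem.Int.mod i k) 0 then
    badAInner (PySem.List.pyGetD arrival i 0) (PySem.List.pyGetD load i 0)
      (PySem.List.slice serverList (some (PySem.Int.mod i k + 1)) (some (PySem.Int.mod i k + k)))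
      p.1 p.2
  else
    (p.1.insert (PySem.Int.mod i k)
       (PySem.List.pyGetD arrival i 0 + PySem.List.pyGetD load i 0),
     p.2.insert (PySem.Int.mod i k) (p.2.getD (PySem.Int.mod i k) 0 + 1))

-- A's 'for i in range(k): server_count[i] = …; num_count[i] = 1' initialisation loop
def badAInit (k : Int) (arrival load : List Int) :
    PySem.Dict Int Int × PySem.Dict Int Int :=
  (PySem.List.pyRange 0 k).foldl
    (fun (p : PySem.Dict Int Int × PySem.Dict Int Int) i =>
      (p.1.insert i (PySem.List.pyGetD arrival i 0 + PySem.List.pyGetD load i 0),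
       p.2.insert i 1))
    (PySem.Dict.empty, PySem.Dict.empty)

-- A's tail: sort items by count, read goal at index -1, keep the ids that reach it
def badAFinish (nc : PySem.Dict Int Int) : List Int :=
  ((PySem.List.sorted nc.items (fun x => x.2)).filter
      (fun j => j.2 ==
        (PySem.List.pyGetD (PySem.List.sorted nc.items (fun x => x.2)) (-1)
          ((0 : Int), (0 : Int))).2)).map
    (fun j => j.1)

def badbusiestServers (k : Int) (arrival : List Int) (load : List Int) : List Int :=
  if (arrival.length : Int) ≤ k then PySem.List.pyRange 0 (arrival.length : Int)
  else
    badAFinish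
      ((PySem.List.pyRange k (arrival.length : Int)).foldl
        (badAStep k arrival load (PySem.List.pyRange 0 k ++ PySem.List.pyRange 0 k))
        (badAInit k arrival load)).2

-- ===== PORT B =====

-- one iteration of B's loop: the free set, then min by cyclic distance (s - i) % k
def badBStep (k i t ld : Int) (endv cnt : List Int) : List Int × List Int :=
  match PySem.List.min?
      ((PySem.List.pyRange 0 k).filter (fun s => decide (PySem.List.pyGetD endv s 0 ≤ t)))
      (fun s => PySem.Int.mod (s - i) k) with
  | none => (endv, cnt)
  | some s =>
    (PySem.List.pySetD endv s (t + ld),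
     PySem.List.pySetD cnt s (PySem.List.pyGetD cnt s 0 + 1))

-- B's initial arrays: end times of the first k requests, counts all 1
def badBInit (k : Int) (arrival load : List Int) : List Int × List Int :=
  ((PySem.List.pyRange 0 k).map
      (fun i => PySem.List.pyGetD arrival i 0 + PySem.List.pyGetD load i 0),
   PySem.List.pyRepeat [(1 : Int)] k)

-- B's tail: ids whose count equals max(count)
def badBFinish (k : Int) (cnt : List Int) : List Int :=
  (PySem.List.pyRange 0 k).filter
    (fun s => PySem.List.pyGetD cnt s 0 == (PySem.List.max? cnt (fun x => x)).getD 0)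

def badbusiestServers_alt (k : Int) (arrival : List Int) (load : List Int) : List Int :=
  if (arrival.length : Int) ≤ k then PySem.List.pyRange 0 (arrival.length : Int)
  else
    badBFinish k
      ((PySem.List.pyRange k (arrival.length : Int)).foldl
        (fun (p : List Int × List Int) i =>
          badBStep k i (PySem.List.pyGetD arrival i 0) (PySem.List.pyGetD load i 0) p.1 p.2)
        (badBInit k arrival load)).2

-- ===== PRECONDITION & SPEC =====
-- Pre_ excludes k ≤ 0 with a nonempty arrival (A raises ZeroDivisionError or KeyError) and, when
-- k < len(arrival), a load list shorter than arrival (A raises IndexError whenever a request with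
-- index ≥ len(load) is assigned a server, and B raises IndexError building its end-time array;
-- only inputs whose out-of-range requests all get dropped still let A return).
def Pre_badbusiestServers (k : Int) (arrival : List Int) (load : List Int) : Prop :=
  (arrival.length : Int) ≤ k ∨ (1 ≤ k ∧ arrival.length ≤ load.length)
instance (k : Int) (arrival : List Int) (load : List Int) : Decidable (Pre_badbusiestServers k arrival load) := by unfold Pre_badbusiestServers; infer_instance
def pvWitness_badbusiestServers : Int × List Int × List Int := (2, ([1, 2, 3], [2, 2, 2]))

def Spec_badbusiestServers (k : Int) (arrival : List Int) (load : List Int) (out : List Int) : Prop := out = badbusiestServers_alt k arrival load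
instance (k : Int) (arrival : List Int) (load : List Int) (out : List Int) : Decidable (Spec_badbusiestServers k arrival load out) := by unfold Spec_badbusiestServers; infer_instance

-- ===== CLAIM (what is proved, stated in full; the proofs are below) =====
def Claim_equal_badbusiestServers : Prop := ∀ (k : Int) (arrival : List Int) (load : List Int), Dom_badbusiestServers k arrival load → Pre_badbusiestServers k arrival load → Spec_badbusiestServers k arrival load (badbusiestServers k arrival load)

-- ===== LEMMAS AND PROOFS =====

-- Python's % on a positive divisor is emod
theorem pymod_eq_emod (a k : Int) (hk : 0 < k) : PySem.Int.mod a k = a % k := by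
  show a.fmod k = a % k
  rw [Int.fmod_eq_emod, if_pos (Or.inl hk.le), add_zero]

theorem fmod_nonneg_lt (a k : Int) (hk : 0 < k) :
    0 ≤ PySem.Int.mod a k ∧ PySem.Int.mod a k < k := by
  rw [pymod_eq_emod a k hk]
  exact ⟨Int.emod_nonneg a hk.ne', Int.emod_lt_of_pos a hk⟩

theorem fmod_add_left (i o k : Int) (hk : 0 < k) :
    PySem.Int.mod (i + o) k = PySem.Int.mod (PySem.Int.mod i k + o) k := by
  rw [pymod_eq_emod _ k hk, pymod_eq_emod _ k hk, pymod_eq_emod _ k hk]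
  conv_lhs => rw [show i + o = i % k + o + k * (i / k) by
    have h := Int.emod_add_ediv i k; linarith]
  rw [Int.add_mul_emod_self_left]

theorem fmod_eq_self (a k : Int) (h0 : 0 ≤ a) (h1 : a < k) : PySem.Int.mod a k = a := by
  rw [pymod_eq_emod a k (lt_of_le_of_lt h0 h1)]
  exact Int.emod_eq_of_lt h0 h1

theorem fmod_sub_cycle (a k : Int) (hk : 0 < k) (h0 : k ≤ a) (h1 : a < 2 * k) :
    PySem.Int.mod a k = a - k := by
  rw [pymod_eq_emod a k hk]
  conv_lhs => rw [show a = a - k + k * 1 by ring]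
  rw [Int.add_mul_emod_self_left]
  exact Int.emod_eq_of_lt (by omega) (by omega)

-- the cyclic-distance key of the o-th scanned server is o itself
theorem key_of_scan (i k o : Int) (hk : 0 < k) (h0 : 0 ≤ o) (h1 : o < k) :
    PySem.Int.mod (PySem.Int.mod (i + o) k - i) k = o := by
  rw [pymod_eq_emod _ k hk, pymod_eq_emod _ k hk]
  rw [Int.sub_emod, Int.emod_emod_of_dvd _ dvd_rfl, ← Int.sub_emod]
  rw [show i + o - i = o by ring]
  exact Int.emod_eq_of_lt h0 h1

-- scanning at offset key(s) reaches s again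
theorem scan_of_key (i k s : Int) (hk : 0 < k) (h0 : 0 ≤ s) (h1 : s < k) :
    PySem.Int.mod (i + PySem.Int.mod (s - i) k) k = s := by
  rw [pymod_eq_emod _ k hk, pymod_eq_emod _ k hk]
  rw [Int.add_emod, Int.emod_emod_of_dvd _ dvd_rfl, ← Int.add_emod]
  rw [show i + (s - i) = s by ring]
  exact Int.emod_eq_of_lt h0 h1

theorem pyGetD_pySetD_int {xs : List Int} {s j : Int} (v d : Int)
    (hs0 : 0 ≤ s) (hs1 : s.toNat < xs.length) (hj : 0 ≤ j) :
    PySem.List.pyGetD (PySem.List.pySetD xs s v) j d =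
      if j = s then v else PySem.List.pyGetD xs j d := by
  have hs := Int.toNat_of_nonneg hs0
  have hj' := Int.toNat_of_nonneg hj
  rw [← hs, ← hj', PySem.List.pyGetD_pySetD_natCast xs s.toNat j.toNat v d hs1]
  split_ifs with h1 h2 h3
  · rfl
  · exfalso; omega
  · exfalso; omega
  · rfl

theorem pyRange_map_add (c a b : Int) :
    (PySem.List.pyRange a b).map (fun o => c + o) = PySem.List.pyRange (c + a) (c + b) := by
  rw [PySem.List.pyRange_one a b, PySem.List.pyRange_one (c + a) (c + b), List.map_map]
  rw [show c + b - (c + a) = b - a by ring]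
  apply List.map_congr_left
  intro x _
  show c + (a + (x : Int)) = c + a + (x : Int)
  ring

-- state relation: the two dicts of A hold, key by key in insertion order 0..k-1, exactly the
-- entries of B's two arrays
def badInv (k : Int) (sc nc : PySem.Dict Int Int) (endv cnt : List Int) : Prop :=
  endv.length = k.toNat ∧ cnt.length = k.toNat ∧
  sc.items = (PySem.List.pyRange 0 k).map (fun s => (s, PySem.List.pyGetD endv s 0)) ∧
  nc.items = (PySem.List.pyRange 0 k).map (fun s => (s, PySem.List.pyGetD cnt s 0))

theorem dict_shape_keys {d : PySem.Dict Int Int} {k : Int} {f : Int → Int}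
    (h : d.items = (PySem.List.pyRange 0 k).map fun s => (s, f s)) :
    d.keys = PySem.List.pyRange 0 k := by
  show d.items.map Prod.fst = _
  rw [h, List.map_map]
  have hid : (Prod.fst ∘ fun s : Int => (s, f s)) = fun s : Int => s := rfl
  rw [hid]
  simp

theorem dict_shape_getD {d : PySem.Dict Int Int} {k : Int} {f : Int → Int}
    (h : d.items = (PySem.List.pyRange 0 k).map fun s => (s, f s))
    {s : Int} (hs0 : 0 ≤ s) (hs1 : s < k) : d.getD s 0 = f s := by
  have hnd : d.keys.Nodup := by
    rw [dict_shape_keys h]; exact PySem.List.nodup_pyRange_one 0 k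
  have hmem : (s, f s) ∈ d.items := by
    rw [h]
    exact List.mem_map_of_mem (PySem.List.mem_pyRange_one.mpr ⟨hs0, hs1⟩)
  exact PySem.Dict.getD_of_mem_items d hmem hnd 0

theorem dict_shape_contains {d : PySem.Dict Int Int} {k : Int} {f : Int → Int}
    (h : d.items = (PySem.List.pyRange 0 k).map fun s => (s, f s))
    {s : Int} (hs0 : 0 ≤ s) (hs1 : s < k) : d.contains s = true := by
  rw [PySem.Dict.contains_iff_mem_keys, dict_shape_keys h]
  exact PySem.List.mem_pyRange_one.mpr ⟨hs0, hs1⟩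

theorem dict_shape_insert {d : PySem.Dict Int Int} {k : Int} {endv : List Int}
    (hlen : endv.length = k.toNat)
    (h : d.items = (PySem.List.pyRange 0 k).map fun s => (s, PySem.List.pyGetD endv s 0))
    {s : Int} (hs0 : 0 ≤ s) (hs1 : s < k) (v : Int) :
    (d.insert s v).items =
      (PySem.List.pyRange 0 k).map
        (fun j => (j, PySem.List.pyGetD (PySem.List.pySetD endv s v) j 0)) := by
  rw [PySem.Dict.items_insert_of_contains d v
      (dict_shape_contains h hs0 hs1), h, List.map_map]
  apply List.map_congr_left
  intro j hj
  obtain ⟨hj0, hj1⟩ := PySem.List.mem_pyRange_one.mp hj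
  have hsl : s.toNat < endv.length := by omega
  simp only [Function.comp]
  rw [pyGetD_pySetD_int v 0 hs0 hsl hj0]
  by_cases hjs : j = s
  · simp [hjs]
  · simp [hjs]

-- lookups agree under the invariant
theorem badInv_getD {k : Int} {sc nc : PySem.Dict Int Int} {endv cnt : List Int}
    (h : badInv k sc nc endv cnt) {s : Int} (hs0 : 0 ≤ s) (hs1 : s < k) :
    sc.getD s 0 = PySem.List.pyGetD endv s 0 ∧ nc.getD s 0 = PySem.List.pyGetD cnt s 0 :=
  ⟨dict_shape_getD h.2.2.1 hs0 hs1, dict_shape_getD h.2.2.2 hs0 hs1⟩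

-- updates preserve the invariant
theorem badInv_update {k : Int} {sc nc : PySem.Dict Int Int} {endv cnt : List Int}
    (h : badInv k sc nc endv cnt) {s : Int} (hs0 : 0 ≤ s) (hs1 : s < k) (v w : Int) :
    badInv k (sc.insert s v) (nc.insert s w)
      (PySem.List.pySetD endv s v) (PySem.List.pySetD cnt s w) := by
  obtain ⟨h1, h2, h3, h4⟩ := h
  refine ⟨?_, ?_, ?_, ?_⟩
  · rw [PySem.List.length_pySetD]; exact h1
  · rw [PySem.List.length_pySetD]; exact h2
  · exact dict_shape_insert h1 h3 hs0 hs1 v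
  · exact dict_shape_insert h2 h4 hs0 hs1 w

-- A's sliced doubled server list is the circular scan order at offsets 1..k-1
theorem slice_serverList (i k : Int) (hk : 0 < k) :
    PySem.List.slice (PySem.List.pyRange 0 k ++ PySem.List.pyRange 0 k)
        (some (PySem.Int.mod i k + 1)) (some (PySem.Int.mod i k + k)) =
      (PySem.List.pyRange 1 k).map (fun o => PySem.Int.mod (i + o) k) := by
  obtain ⟨hm0, hm1⟩ := fmod_nonneg_lt i k hk
  set m := PySem.Int.mod i k with hm
  rw [PySem.List.slice_toNat _ (by omega) (by omega)]
  have e1 : PySem.List.pyRange 0 k ++ PySem.List.pyRange 0 k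
      = PySem.List.pyRange 0 (m + 1) ++ (PySem.List.pyRange (m + 1) k ++ PySem.List.pyRange 0 k) := by
    rw [← List.append_assoc, ← PySem.List.pyRange_one_append 0 (m + 1) k (by omega) (by omega)]
  rw [e1]
  have e2 : (m + 1).toNat = (PySem.List.pyRange 0 (m + 1)).length := by
    rw [PySem.List.length_pyRange_one]; omega
  rw [e2, List.drop_left]
  have e3 : (m + k).toNat - (PySem.List.pyRange 0 (m + 1)).length
      = (k - m - 1).toNat + m.toNat := by
    rw [PySem.List.length_pyRange_one]; omega
  rw [e3, List.take_append]
  have e4 : (PySem.List.pyRange (m + 1) k).length = (k - m - 1).toNat := by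
    rw [PySem.List.length_pyRange_one]; omega
  rw [List.take_of_length_le (by omega), e4, Nat.add_sub_cancel_left]
  have e5 : PySem.List.pyRange 0 k = PySem.List.pyRange 0 m ++ PySem.List.pyRange m k := by
    rw [← PySem.List.pyRange_one_append 0 m k (by omega) (by omega)]
  rw [e5]
  have e6 : m.toNat = (PySem.List.pyRange 0 m).length := by
    rw [PySem.List.length_pyRange_one]; omega
  rw [e6, List.take_left]
  rw [PySem.List.pyRange_one_append 1 (k - m) k (by omega) (by omega), List.map_append]
  have p1 : (PySem.List.pyRange 1 (k - m)).map (fun o => PySem.Int.mod (i + o) k)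
      = PySem.List.pyRange (m + 1) k := by
    rw [List.map_congr_left (g := fun o => m + o) (fun o ho => by
      obtain ⟨ho0, ho1⟩ := PySem.List.mem_pyRange_one.mp ho
      rw [fmod_add_left i o k hk, ← hm]
      exact fmod_eq_self (m + o) k (by omega) (by omega))]
    rw [pyRange_map_add m 1 (k - m), show m + (k - m) = k by ring]
  have p2 : (PySem.List.pyRange (k - m) k).map (fun o => PySem.Int.mod (i + o) k)
      = PySem.List.pyRange 0 m := by
    rw [List.map_congr_left (g := fun o => (m - k) + o) (fun o ho => by
      obtain ⟨ho0, ho1⟩ := PySem.List.mem_pyRange_one.mp ho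
      rw [fmod_add_left i o k hk, ← hm]
      rw [fmod_sub_cycle (m + o) k hk (by omega) (by omega)]
      ring)]
    rw [pyRange_map_add (m - k) (k - m) k, show m - k + (k - m) = 0 by ring,
      show m - k + k = m by ring]
  rw [p1, p2]

-- find? respects pointwise-equal predicates
theorem find?_congr_mem {α : Type} (l : List α) (p q : α → Bool)
    (h : ∀ x ∈ l, p x = q x) : l.find? p = l.find? q := by
  induction l with
  | nil => rfl
  | cons x xs ih =>
    have hx := h x List.mem_cons_self
    by_cases hp : p x = true
    · rw [List.find?_cons_of_pos hp, List.find?_cons_of_pos (hx ▸ hp)]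
    · rw [List.find?_cons_of_neg hp, List.find?_cons_of_neg (hx ▸ hp),
        ih (fun y hy => h y (List.mem_cons_of_mem x hy))]

-- A's break-on-first-free scan is find? on the scanned list
theorem badAInner_eq_find (t ld : Int) (js : List Int) (sc nc : PySem.Dict Int Int) :
    badAInner t ld js sc nc =
      match js.find? (fun j => decide (sc.getD j 0 ≤ t)) with
      | none => (sc, nc)
      | some j => (sc.insert j (t + ld), nc.insert j (nc.getD j 0 + 1)) := by
  induction js with
  | nil => rfl
  | cons j rest ih =>
    by_cases hj : sc.getD j 0 ≤ t
    · rw [List.find?_cons_of_pos (by simpa using hj)]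
      simp only [badAInner, if_pos hj]
    · rw [List.find?_cons_of_neg (by simpa using hj)]
      simp only [badAInner, if_neg hj]
      exact ih

-- find? over pyRange finds the least index satisfying the predicate
theorem find?_pyRange_some (q : Int → Bool) :
    ∀ (n : Nat) (a b o₀ : Int), (b - a).toNat = n →
      (PySem.List.pyRange a b).find? q = some o₀ →
      q o₀ = true ∧ a ≤ o₀ ∧ o₀ < b ∧ ∀ o, a ≤ o → o < o₀ → q o = false := by
  intro n
  induction n with
  | zero =>
    intro a b o₀ hn hf
    rw [PySem.List.pyRange_one_eq_nil (by omega)] at hf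
    exact absurd hf (by simp)
  | succ m ih =>
    intro a b o₀ hn hf
    have hab : a < b := by omega
    rw [PySem.List.pyRange_one_cons hab] at hf
    by_cases hqa : q a = true
    · rw [List.find?_cons_of_pos hqa] at hf
      have : o₀ = a := by injection hf with h; exact h.symm
      subst this
      exact ⟨hqa, le_refl _, hab, fun o h1 h2 => by omega⟩
    · rw [List.find?_cons_of_neg hqa] at hf
      obtain ⟨hq, h1, h2, h3⟩ := ih (a + 1) b o₀ (by omega) hf
      refine ⟨hq, by omega, h2, fun o ho1 ho2 => ?_⟩
      by_cases hoa : o = a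
      · subst hoa; simpa using hqa
      · exact h3 o (by omega) ho2

-- the first free server in circular scan order is the free server of minimal cyclic distance
theorem find_scan_eq_min (i k : Int) (hk : 0 < k) (Q : Int → Bool) :
    ((PySem.List.pyRange 0 k).map (fun o => PySem.Int.mod (i + o) k)).find? Q
      = PySem.List.min? ((PySem.List.pyRange 0 k).filter Q)
          (fun s => PySem.Int.mod (s - i) k) := by
  rw [List.find?_map]
  cases hf : (PySem.List.pyRange 0 k).find? (Q ∘ fun o => PySem.Int.mod (i + o) k) with
  | none =>
    have hnone := List.find?_eq_none.mp hf
    have hfil : (PySem.List.pyRange 0 k).filter Q = [] := by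
      rw [List.filter_eq_nil_iff]
      intro s hs
      obtain ⟨hs0, hs1⟩ := PySem.List.mem_pyRange_one.mp hs
      obtain ⟨hk0, hk1⟩ := fmod_nonneg_lt (s - i) k hk
      have := hnone (PySem.Int.mod (s - i) k) (PySem.List.mem_pyRange_one.mpr ⟨hk0, hk1⟩)
      simp only [Function.comp] at this
      rw [scan_of_key i k s hk hs0 hs1] at this
      simpa using this
    rw [hfil]
    simp [(PySem.List.min?_eq_none_iff _ _).mpr rfl]
  | some o₀ =>
    obtain ⟨hq, ho0, ho1, hmin⟩ :=
      find?_pyRange_some (Q ∘ fun o => PySem.Int.mod (i + o) k) (k - 0).toNat 0 k o₀ rfl hf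
    simp only [Function.comp] at hq hmin
    set key : Int → Int := fun s => PySem.Int.mod (s - i) k with hkey
    set j := PySem.Int.mod (i + o₀) k with hj
    obtain ⟨hj0, hj1⟩ := fmod_nonneg_lt (i + o₀) k hk
    have hkeyj : key j = o₀ := key_of_scan i k o₀ hk ho0 ho1
    have hjmem : j ∈ (PySem.List.pyRange 0 k).filter Q := by
      rw [List.mem_filter]
      exact ⟨PySem.List.mem_pyRange_one.mpr ⟨hj0, hj1⟩, hq⟩
    -- every free server has cyclic distance at least o₀
    have hlb : ∀ s ∈ (PySem.List.pyRange 0 k).filter Q, o₀ ≤ key s := by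
      intro s hs
      obtain ⟨hsr, hQs⟩ := List.mem_filter.mp hs
      obtain ⟨hs0, hs1⟩ := PySem.List.mem_pyRange_one.mp hsr
      obtain ⟨hk0, hk1⟩ := fmod_nonneg_lt (s - i) k hk
      by_contra hlt
      have := hmin (key s) hk0 (by omega)
      rw [hkey] at this
      simp only at this
      rw [scan_of_key i k s hk hs0 hs1] at this
      rw [this] at hQs
      exact absurd hQs (by simp)
    -- min? is some s₀ with minimal key; distinct keys force s₀ = j
    cases hmx : PySem.List.min? ((PySem.List.pyRange 0 k).filter Q) key with
    | none =>
      have := (PySem.List.min?_eq_none_iff _ _).mp hmx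
      rw [this] at hjmem
      exact absurd hjmem (by simp)
    | some s₀ =>
      have hs₀mem := PySem.List.min?_mem hmx
      obtain ⟨hs₀r, _⟩ := List.mem_filter.mp hs₀mem
      obtain ⟨hs₀0, hs₀1⟩ := PySem.List.mem_pyRange_one.mp hs₀r
      have h1 : key s₀ ≤ key j := PySem.List.min?_isMin hmx j hjmem
      have h2 : o₀ ≤ key s₀ := hlb s₀ hs₀mem
      have hkeq : key s₀ = o₀ := by rw [hkeyj] at h1; omega
      have : s₀ = j := by
        have := scan_of_key i k s₀ hk hs₀0 hs₀1
        rw [hkey] at hkeq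
        simp only at hkeq
        rw [hkeq] at this
        rw [← this, hj]
      rw [Option.map_some, this]

-- one main-loop step preserves the invariant
theorem badStep_bridge (k : Int) (arrival load : List Int) (hk : 0 < k) (i : Int)
    {sc nc : PySem.Dict Int Int} {endv cnt : List Int} (h : badInv k sc nc endv cnt) :
    badInv k
      (badAStep k arrival load (PySem.List.pyRange 0 k ++ PySem.List.pyRange 0 k) (sc, nc) i).1
      (badAStep k arrival load (PySem.List.pyRange 0 k ++ PySem.List.pyRange 0 k) (sc, nc) i).2
      (badBStep k i (PySem.List.pyGetD arrival i 0) (PySem.List.pyGetD load i 0) endv cnt).1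
      (badBStep k i (PySem.List.pyGetD arrival i 0) (PySem.List.pyGetD load i 0) endv cnt).2 := by
  set t := PySem.List.pyGetD arrival i 0 with ht
  set ld := PySem.List.pyGetD load i 0 with hld
  obtain ⟨hm0, hm1⟩ := fmod_nonneg_lt i k hk
  have hg := (badInv_getD h hm0 hm1).1
  -- A's step is find?-and-update over the full circular scan list
  have hscan0 : PySem.Int.mod (i + 0) k = PySem.Int.mod i k := by rw [add_zero]
  have hsplit : (PySem.List.pyRange 0 k).map (fun o => PySem.Int.mod (i + o) k)
      = PySem.Int.mod i k ::
        (PySem.List.pyRange 1 k).map (fun o => PySem.Int.mod (i + o) k) := by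
    rw [PySem.List.pyRange_one_cons hk]
    norm_num
  have hA : badAStep k arrival load (PySem.List.pyRange 0 k ++ PySem.List.pyRange 0 k) (sc, nc) i
      = match ((PySem.List.pyRange 0 k).map (fun o => PySem.Int.mod (i + o) k)).find?
          (fun j => decide (sc.getD j 0 ≤ t)) with
        | none => (sc, nc)
        | some j => (sc.insert j (t + ld), nc.insert j (nc.getD j 0 + 1)) := by
    rw [hsplit]
    by_cases hle : sc.getD (PySem.Int.mod i k) 0 ≤ t
    · rw [List.find?_cons_of_pos (by simpa using hle)]
      simp only [badAStep, ← ht, ← hld, if_neg (not_lt.mpr hle)]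
    · rw [List.find?_cons_of_neg (by simpa using hle)]
      simp only [badAStep, ← ht, ← hld, if_pos (lt_of_not_ge hle)]
      rw [slice_serverList i k hk, badAInner_eq_find]
  -- replace dict lookups by array lookups on the scanned servers
  have hcong : ((PySem.List.pyRange 0 k).map (fun o => PySem.Int.mod (i + o) k)).find?
      (fun j => decide (sc.getD j 0 ≤ t))
      = ((PySem.List.pyRange 0 k).map (fun o => PySem.Int.mod (i + o) k)).find?
        (fun s => decide (PySem.List.pyGetD endv s 0 ≤ t)) := by
    apply find?_congr_mem
    intro x hx
    obtain ⟨o, _, rfl⟩ := List.mem_map.mp hx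
    obtain ⟨hx0, hx1⟩ := fmod_nonneg_lt (i + o) k hk
    rw [(badInv_getD h hx0 hx1).1]
  rw [hA, hcong, find_scan_eq_min i k hk _]
  show badInv k
      (match PySem.List.min? ((PySem.List.pyRange 0 k).filter
          (fun s => decide (PySem.List.pyGetD endv s 0 ≤ t)))
          (fun s => PySem.Int.mod (s - i) k) with
        | none => (sc, nc)
        | some j => (sc.insert j (t + ld), nc.insert j (nc.getD j 0 + 1))).1 _
      (badBStep k i t ld endv cnt).1 (badBStep k i t ld endv cnt).2
  unfold badBStep
  cases hmx : PySem.List.min? ((PySem.List.pyRange 0 k).filter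
      (fun s => decide (PySem.List.pyGetD endv s 0 ≤ t)))
      (fun s => PySem.Int.mod (s - i) k) with
  | none => exact h
  | some s =>
    obtain ⟨hsr, _⟩ := List.mem_filter.mp (PySem.List.min?_mem hmx)
    obtain ⟨hs0, hs1⟩ := PySem.List.mem_pyRange_one.mp hsr
    have hnc := (badInv_getD h hs0 hs1).2
    simp only [hnc]
    exact badInv_update h hs0 hs1 _ _

-- generic: a pointwise-preserved relation survives parallel folds
theorem foldl_rel {σ₁ σ₂ : Type} (R : σ₁ → σ₂ → Prop) (f : σ₁ → Int → σ₁) (g : σ₂ → Int → σ₂)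
    (l : List Int) (h : ∀ a b x, x ∈ l → R a b → R (f a x) (g b x)) :
    ∀ a b, R a b → R (l.foldl f a) (l.foldl g b) := by
  induction l with
  | nil => intro a b hab; simpa using hab
  | cons x xs ih =>
    intro a b hab
    simp only [List.foldl_cons]
    exact ih (fun a b y hy => h a b y (List.mem_cons_of_mem x hy)) _ _
      (h a b x List.mem_cons_self hab)

-- the initial states are related
theorem badInit_bridge (k : Int) (arrival load : List Int) (hk : 0 < k) :
    badInv k (badAInit k arrival load).1 (badAInit k arrival load).2
      (badBInit k arrival load).1 (badBInit k arrival load).2 := by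
  unfold badAInit badBInit
  rw [PySem.List.foldl_prod_mk
      (f := fun (d : PySem.Dict Int Int) i =>
        d.insert i (PySem.List.pyGetD arrival i 0 + PySem.List.pyGetD load i 0))
      (g := fun (d : PySem.Dict Int Int) i => d.insert i 1)]
  have hfresh : ∀ a ∈ PySem.List.pyRange 0 k,
      (PySem.Dict.empty : PySem.Dict Int Int).contains ((fun x : Int => x) a) = false := by
    intro a _; simp
  have hnd : ((PySem.List.pyRange 0 k).map (fun x : Int => x)).Nodup := by
    simpa using PySem.List.nodup_pyRange_one 0 k
  refine ⟨by simp [PySem.List.length_pyRange_one], by simp [PySem.List.pyRepeat_singleton], ?_, ?_⟩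
  · rw [PySem.Dict.items_foldl_insert_fresh (PySem.List.pyRange 0 k) (fun x : Int => x)
        (fun i => PySem.List.pyGetD arrival i 0 + PySem.List.pyGetD load i 0)
        PySem.Dict.empty hfresh hnd]
    simp only [show (PySem.Dict.empty : PySem.Dict Int Int).items = [] from rfl,
      List.nil_append]
    apply List.map_congr_left
    intro s hs
    obtain ⟨hs0, hs1⟩ := PySem.List.mem_pyRange_one.mp hs
    rw [PySem.List.pyGetD_map_pyRange_of_nonneg _ k s 0 hs0 hs1]
  · rw [PySem.Dict.items_foldl_insert_fresh (PySem.List.pyRange 0 k) (fun x : Int => x)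
        (fun _ => (1 : Int)) PySem.Dict.empty hfresh hnd]
    simp only [show (PySem.Dict.empty : PySem.Dict Int Int).items = [] from rfl,
      List.nil_append]
    apply List.map_congr_left
    intro s hs
    obtain ⟨hs0, hs1⟩ := PySem.List.mem_pyRange_one.mp hs
    have hlrep : ((List.replicate k.toNat (1 : Int)).length : Int) = k := by
      rw [List.length_replicate]; omega
    rw [PySem.List.pyRepeat_singleton, PySem.List.pyGetD_eq_getElem _ 0 hs0
      (by rw [hlrep]; exact hs1)]
    simp

-- stable sort commutes with filtering on one key value: a single insertion step
theorem insertBy_filter_key (c : Int) (x : Int × Int) :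
    ∀ ys : List (Int × Int), ys.Pairwise (fun a b => a.2 ≤ b.2) →
      (PySem.List.insertBy (fun a b => decide (a.2 < b.2)) x ys).filter
          (fun y => y.2 == c) =
        ys.filter (fun y => y.2 == c) ++ [x].filter (fun y => y.2 == c) := by
  intro ys
  induction ys with
  | nil => intro _; simp [PySem.List.insertBy]
  | cons y ys ih =>
    intro hp
    have hpy : ∀ z ∈ ys, y.2 ≤ z.2 := (List.pairwise_cons.mp hp).1
    have hpt : ys.Pairwise (fun a b => a.2 ≤ b.2) := (List.pairwise_cons.mp hp).2
    simp only [PySem.List.insertBy]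
    split_ifs with hlt
    · have hxy : x.2 < y.2 := of_decide_eq_true hlt
      by_cases hc : x.2 = c
      · have hnil : (y :: ys).filter (fun y => y.2 == c) = [] := by
          rw [List.filter_eq_nil_iff]
          intro z hz
          have : y.2 ≤ z.2 := by
            rcases List.mem_cons.mp hz with h | h
            · rw [h]
            · exact hpy z h
          simp only [beq_iff_eq]
          omega
        have hL : List.filter (fun y => y.2 == c) (x :: y :: ys)
            = x :: List.filter (fun y => y.2 == c) (y :: ys) := by
          rw [List.filter_cons]
          simp [hc]
        rw [hL, hnil]
        simp [hc]
      · have hL : List.filter (fun y => y.2 == c) (x :: y :: ys)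
            = List.filter (fun y => y.2 == c) (y :: ys) := by
          rw [List.filter_cons]
          simp [hc]
        rw [hL]
        simp [hc]
    · rw [List.filter_cons, List.filter_cons, ih hpt]
      split_ifs with hy
      · rw [List.cons_append]
      · rfl

theorem sorted_filter_key (c : Int) (l : List (Int × Int)) :
    (PySem.List.sorted l (fun x => x.2)).filter (fun y => y.2 == c) =
      l.filter (fun y => y.2 == c) := by
  induction l using List.reverseRecOn with
  | nil => simp [PySem.List.sorted]
  | append_singleton l x ih =>
    rw [PySem.List.sorted_eq_foldl_insertBy, List.foldl_append, List.foldl_cons, List.foldl_nil,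
      ← PySem.List.sorted_eq_foldl_insertBy]
    rw [insertBy_filter_key c x (PySem.List.sorted l (fun x => x.2))
      (PySem.List.sorted_pairwise l (fun x => x.2)), ih, List.filter_append]

-- the two finishing steps agree: the stable sort keeps ids with the maximal count in id order
theorem badFinish_bridge (k : Int) (hk : 0 < k) (nc : PySem.Dict Int Int) (cnt : List Int)
    (hlen : cnt.length = k.toNat)
    (hitems : nc.items =
      (PySem.List.pyRange 0 k).map (fun s => (s, PySem.List.pyGetD cnt s 0))) :
    badAFinish nc = badBFinish k cnt := by
  have hne : nc.items ≠ [] := by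
    rw [hitems, PySem.List.pyRange_one_cons hk]
    simp
  have hsne : PySem.List.sorted nc.items (fun x => x.2) ≠ [] := by
    intro hcon
    exact hne ((PySem.List.sorted_eq_nil_iff _ _ _).mp hcon)
  have hcnt_le : ∀ y ∈ cnt,
      y ≤ ((PySem.List.sorted nc.items (fun x => x.2)).getLast hsne).2 := by
    intro y hy
    obtain ⟨idx, hidxlt, hgety⟩ := List.mem_iff_getElem.mp hy
    have hidxk : (idx : Int) < k := by omega
    have hgd : PySem.List.pyGetD cnt (idx : Int) 0 = cnt[idx] := by
      rw [PySem.List.pyGetD_eq_getElem cnt 0 (by omega) (by omega)]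
      simp
    have hmemi : ((idx : Int), y) ∈ nc.items := by
      rw [hitems, ← hgety, ← hgd]
      exact List.mem_map_of_mem (PySem.List.mem_pyRange_one.mpr ⟨by omega, hidxk⟩)
    have hmems : ((idx : Int), y) ∈ PySem.List.sorted nc.items (fun x => x.2) :=
      (PySem.List.mem_sorted _ _ _ _).mpr hmemi
    obtain ⟨p, hp, hpe⟩ := List.mem_iff_getElem.mp hmems
    have hmono := PySem.List.key_sorted_getElem_mono nc.items (fun x => x.2)
      (p := p) (q := (PySem.List.sorted nc.items (fun x => x.2)).length - 1)
      (by omega) (by omega)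
    rw [hpe] at hmono
    rw [List.getLast_eq_getElem hsne]
    exact hmono
  have hsnd_mem : ∀ p ∈ nc.items, p.2 ∈ cnt := by
    rw [hitems]
    intro p hp
    obtain ⟨s, hs, rfl⟩ := List.mem_map.mp hp
    obtain ⟨hs0, hs1⟩ := PySem.List.mem_pyRange_one.mp hs
    rw [PySem.List.pyGetD_eq_getElem cnt 0 hs0 (by omega)]
    exact List.getElem_mem _
  have hg_mem : ((PySem.List.sorted nc.items (fun x => x.2)).getLast hsne).2 ∈ cnt := by
    have h1 : (PySem.List.sorted nc.items (fun x => x.2)).getLast hsne ∈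
        PySem.List.sorted nc.items (fun x => x.2) := List.getLast_mem hsne
    exact hsnd_mem _ ((PySem.List.mem_sorted _ _ _ _).mp h1)
  have hcntne : cnt ≠ [] := by
    intro hc
    rw [hc] at hlen
    simp at hlen
    omega
  obtain ⟨b, hb⟩ : ∃ b, PySem.List.max? cnt (fun x => x) = some b := by
    cases hmx : PySem.List.max? cnt (fun x => x) with
    | none => exact absurd ((PySem.List.max?_eq_none_iff _ _).mp hmx) hcntne
    | some b => exact ⟨b, rfl⟩
  have hbg : b = ((PySem.List.sorted nc.items (fun x => x.2)).getLast hsne).2 :=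
    le_antisymm (hcnt_le b (PySem.List.max?_mem hb))
      (PySem.List.max?_isMax hb _ hg_mem)
  unfold badAFinish badBFinish
  rw [PySem.List.pyGetD_neg_one _ _ hsne, hb, Option.getD_some, hbg,
    sorted_filter_key _ nc.items]
  generalize ((PySem.List.sorted nc.items (fun x => x.2)).getLast hsne).2 = G
  rw [hitems, List.filter_map, List.map_map]
  have hcomp1 : ((fun j : Int × Int => j.1) ∘ fun s : Int => (s, PySem.List.pyGetD cnt s 0))
      = fun s : Int => s := rfl
  have hcomp2 : ((fun j : Int × Int => j.2 == G) ∘ fun s : Int => (s, PySem.List.pyGetD cnt s 0))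
      = fun s : Int => PySem.List.pyGetD cnt s 0 == G := rfl
  rw [hcomp1, hcomp2]
  simp

-- ===== VERDICT (by name: the statement is the Claim_ definition above) =====
theorem badbusiestServers_spec : Claim_equal_badbusiestServers := by
  intro k arrival load _ hpre
  show badbusiestServers k arrival load = badbusiestServers_alt k arrival load
  by_cases hkn : (arrival.length : Int) ≤ k
  · rw [badbusiestServers, badbusiestServers_alt, if_pos hkn, if_pos hkn]
  · have hk : 0 < k := by
      rcases hpre with h | ⟨h, _⟩
      · omega
      · omega
    rw [badbusiestServers, badbusiestServers_alt, if_neg hkn, if_neg hkn]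
    have hinv := foldl_rel
      (fun (p : PySem.Dict Int Int × PySem.Dict Int Int) (q : List Int × List Int) =>
        badInv k p.1 p.2 q.1 q.2)
      (badAStep k arrival load (PySem.List.pyRange 0 k ++ PySem.List.pyRange 0 k))
      (fun (p : List Int × List Int) i =>
        badBStep k i (PySem.List.pyGetD arrival i 0) (PySem.List.pyGetD load i 0) p.1 p.2)
      (PySem.List.pyRange k (arrival.length : Int))
      (fun a b x _ hab => by
        have := badStep_bridge k arrival load hk x (sc := a.1) (nc := a.2)
          (endv := b.1) (cnt := b.2) hab
        simpa using this)
      (badAInit k arrival load) (badBInit k arrival load)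
      (badInit_bridge k arrival load hk)
    set st := (PySem.List.pyRange k (arrival.length : Int)).foldl
      (badAStep k arrival load (PySem.List.pyRange 0 k ++ PySem.List.pyRange 0 k))
      (badAInit k arrival load) with hst
    set st' := (PySem.List.pyRange k (arrival.length : Int)).foldl
      (fun (p : List Int × List Int) i =>
        badBStep k i (PySem.List.pyGetD arrival i 0) (PySem.List.pyGetD load i 0) p.1 p.2)
      (badBInit k arrival load) with hst'
    exact badFinish_bridge k hk st.2 st'.2 hinv.2.1 hinv.2.2.2
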